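-- pv_equiv track=rewrite | github.com/yunn3/recursion-problems | 466-countCharactersAfterN/main.py | countCharactersAfterN
-- ===== SOURCE A (Python) =====
-- def countCharactersAfterN(arr):
--
--     after_n = ["n", "o", "p", "q", "r", "s", "t", "u", "v", "w", "x", "y", "z"]
--     count = 0
--
--     for sentence in arr:
--         for character in sentence:
--             if character in after_n:
--                 count += 1
--
--     return count
-- ===== SOURCE B (Python) =====
-- def countCharactersAfterN(arr):
--     freq = {}
--     for sentence in arr:
--         for character in sentence:
--             freq[character] = freq.get(character, 0) + 1
--     total = 0
--     for letter in "nopqrstuvwxyz":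
--         total += freq.get(letter, 0)
--     return total
-- ===== Notes on version B (the rewrite author's own statement) =====
-- stated objective: faster
-- what changed: Replaced the single membership-filtered scan (13-element list membership test per character) with a build-index-then-query decomposition: one pass builds a full per-character frequency dict, then a second loop over the thirteen target letters 'n'..'z' sums their counts.
import Mathlib
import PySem

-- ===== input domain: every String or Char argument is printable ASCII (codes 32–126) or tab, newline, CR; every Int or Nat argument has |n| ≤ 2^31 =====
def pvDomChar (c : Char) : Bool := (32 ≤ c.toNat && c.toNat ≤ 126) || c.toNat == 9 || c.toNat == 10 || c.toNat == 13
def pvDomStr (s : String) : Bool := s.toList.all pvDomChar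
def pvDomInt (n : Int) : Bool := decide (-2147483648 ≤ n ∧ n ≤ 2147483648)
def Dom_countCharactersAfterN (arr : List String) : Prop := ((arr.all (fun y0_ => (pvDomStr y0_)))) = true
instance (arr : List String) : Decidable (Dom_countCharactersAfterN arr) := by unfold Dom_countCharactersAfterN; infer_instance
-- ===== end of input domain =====

-- B builds a full character-frequency dict in one pass, then sums the counts of the
-- thirteen target letters 'n'..'z' in a second query loop (alternative decomposition).

-- ===== PORT A =====
def countCharactersAfterN (arr : List String) : Int :=
  let after_n : List Char := ['n','o','p','q','r','s','t','u','v','w','x','y','z']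
  arr.foldl (fun count sentence =>
    sentence.toList.foldl (fun count character =>
      if character ∈ after_n then count + 1 else count) count) 0

-- ===== PORT B =====
def countCharactersAfterN_alt (arr : List String) : Int :=
  let freq : PySem.Dict Char Int :=
    arr.foldl (fun freq sentence =>
      sentence.toList.foldl (fun freq character =>
        freq.insert character (freq.getD character 0 + 1)) freq)
    PySem.Dict.empty
  "nopqrstuvwxyz".toList.foldl (fun total letter => total + freq.getD letter 0) 0

-- ===== PRECONDITION & SPEC =====
def Spec_countCharactersAfterN (arr : List String) (out : Int) : Prop := out = countCharactersAfterN_alt arr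
instance (arr : List String) (out : Int) : Decidable (Spec_countCharactersAfterN arr out) := by unfold Spec_countCharactersAfterN; infer_instance

-- ===== CLAIM (what is proved, stated in full; the proofs are below) =====
def Claim_equal_countCharactersAfterN : Prop := ∀ (arr : List String), Dom_countCharactersAfterN arr → Spec_countCharactersAfterN arr (countCharactersAfterN arr)

-- ===== LEMMAS AND PROOFS =====

-- the target letters (after_n as a list = "nopqrstuvwxyz".toList)
def pvTgt : List Char := ['n','o','p','q','r','s','t','u','v','w','x','y','z']

-- A's inner loop counts the characters of the sentence lying in pvTgt
theorem pvA_inner (l : List Char) (k : Int) :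
    l.foldl (fun count character => if character ∈ pvTgt then count + 1 else count) k
      = k + ((l.filter (fun c => c ∈ pvTgt)).length : Int) := by
  induction l generalizing k with
  | nil => simp
  | cons x l ih =>
    simp only [List.foldl_cons, List.filter_cons]
    by_cases hx : x ∈ pvTgt
    · simp [hx, ih]; ring
    · simp [hx, ih]

-- B's inner loop: getD of the updated dict = old getD + occurrences in the sentence
theorem pvB_inner (l : List Char) (d : PySem.Dict Char Int) (v : Char) :
    (l.foldl (fun d c => d.insert c (d.getD c 0 + 1)) d).getD v 0
      = d.getD v 0 + (l.count v : Int) := by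
  induction l generalizing d with
  | nil => simp
  | cons x l ih =>
    simp only [List.foldl_cons, ih]
    rw [PySem.Dict.getD_insert, List.count_cons]
    by_cases hv : v = x
    · subst hv
      simp
      ring
    · have hbx : (v == x) = false := by simp [hv]
      simp [hv]
      exact fun h => hv h.symm

-- B's outer loop: getD of the final dict = total occurrences across all sentences
theorem pvB_outer (arr : List String) (d : PySem.Dict Char Int) (v : Char) :
    (arr.foldl (fun d s => s.toList.foldl (fun d c => d.insert c (d.getD c 0 + 1)) d) d).getD v 0
      = d.getD v 0 + ((arr.map (fun s => (s.toList.count v : Int))).sum) := by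
  induction arr generalizing d with
  | nil => simp
  | cons s arr ih =>
    simp only [List.foldl_cons, ih, pvB_inner, List.map_cons, List.sum_cons]
    ring

-- B's summation loop is a sum over the target letters
theorem pvSumLoop (ts : List Char) (t : Int) (g : Char → Int) :
    ts.foldl (fun total letter => total + g letter) t = t + (ts.map g).sum := by
  induction ts generalizing t with
  | nil => simp
  | cons c ts ih => simp [ih]; ring

-- sum over a Nodup list of a point indicator
theorem pvIndicator (ts : List Char) (hts : ts.Nodup) (x : Char) :
    (ts.map (fun c => if x = c then (1 : Int) else 0)).sum
      = if x ∈ ts then 1 else 0 := by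
  induction ts with
  | nil => simp
  | cons c ts ih =>
    rcases List.nodup_cons.mp hts with ⟨hc, hn⟩
    by_cases hx : x = c
    · subst hx
      have hxts : x ∉ ts := hc
      simp [ih hn, hxts]
    · have hmem : (x ∈ c :: ts) ↔ x ∈ ts := by simp [List.mem_cons, hx]
      simp only [List.map_cons, List.sum_cons, ih hn, hmem]
      simp [hx]

-- summing per-letter occurrence counts over the (Nodup) targets = filtered length
theorem pvFilterSum (l : List Char) :
    (pvTgt.map (fun c => (l.count c : Int))).sum
      = ((l.filter (fun c => c ∈ pvTgt)).length : Int) := by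
  induction l with
  | nil => simp
  | cons x l ih =>
    have hnd : pvTgt.Nodup := by decide
    have hcount : ∀ c : Char, ((x :: l).count c : Int)
        = (l.count c : Int) + (if x = c then (1 : Int) else 0) := by
      intro c
      rw [List.count_cons]
      by_cases hx : x = c <;> simp [hx]
    calc (pvTgt.map (fun c => ((x :: l).count c : Int))).sum
        = (pvTgt.map (fun c => (l.count c : Int) + (if x = c then (1 : Int) else 0))).sum := by
          simp only [hcount]
      _ = (pvTgt.map (fun c => (l.count c : Int))).sum
            + (pvTgt.map (fun c => if x = c then (1 : Int) else 0)).sum := by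
          rw [← List.sum_map_add]
      _ = ((l.filter (fun c => c ∈ pvTgt)).length : Int)
            + (if x ∈ pvTgt then 1 else 0) := by
          rw [ih, pvIndicator pvTgt hnd x]
      _ = (((x :: l).filter (fun c => c ∈ pvTgt)).length : Int) := by
          rw [List.filter_cons]
          by_cases hx : x ∈ pvTgt
          · simp only [hx, if_pos, decide_true, List.length_cons]
            push_cast
            ring
          · simp [hx]

-- swap the two summations (sum over letters of sums over sentences)
theorem pvSwap (arr : List String) :
    (pvTgt.map (fun c => (arr.map (fun s => (s.toList.count c : Int))).sum)).sum
      = (arr.map (fun s => (pvTgt.map (fun c => (s.toList.count c : Int))).sum)).sum := by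
  induction arr with
  | nil => simp
  | cons s arr ih =>
    simp only [List.map_cons, List.sum_cons, ← ih]
    rw [← List.sum_map_add]

-- A as a sum over sentences
theorem pvA_sum (arr : List String) (k : Int) :
    arr.foldl (fun count sentence =>
      sentence.toList.foldl (fun count character =>
        if character ∈ pvTgt then count + 1 else count) count) k
      = k + (arr.map (fun s => ((s.toList.filter (fun c => c ∈ pvTgt)).length : Int))).sum := by
  induction arr generalizing k with
  | nil => simp
  | cons s arr ih =>
    rw [List.foldl_cons, pvA_inner, ih]
    simp only [List.map_cons, List.sum_cons]
    ring

-- ===== VERDICT (by name: the statement is the Claim_ definition above) =====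
set_option maxHeartbeats 1000000 in
theorem countCharactersAfterN_spec : Claim_equal_countCharactersAfterN := by
  intro arr _
  show countCharactersAfterN arr = countCharactersAfterN_alt arr
  unfold countCharactersAfterN countCharactersAfterN_alt
  have htgt : "nopqrstuvwxyz".toList = pvTgt := by decide
  have hlist : (['n','o','p','q','r','s','t','u','v','w','x','y','z'] : List Char) = pvTgt := rfl
  rw [htgt, hlist, pvA_sum arr 0, pvSumLoop]
  simp only [pvB_outer, PySem.Dict.getD_empty, zero_add]
  rw [pvSwap]
  congr 1
  apply List.map_congr_left
  intro s _
  exact (pvFilterSum s.toList).symm
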